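-- pv_equiv track=rewrite | github.com/Horse64/core.horse64.org | translator/translator_modules/translator_runtime_helpers_templating.py | s_to_tokens
-- ===== SOURCE A (Python) =====
-- def get_identifier_len(s, pos):
--     len_s = len(s)
--     i = pos
--     while i < len_s:
--         c = s[i]
--         if ((i == pos or ((ord(c) < ord('0') or ord(c) > ord('9')))) and
--                (ord(c) < ord('A') or ord(c) > ord('Z')) and
--                (ord(c) < ord('a') or ord(c) > ord('z')) and
--                c != "_" and
--                ord(c) <= 127):
--             break
--         i += 1
--     return i - pos
--
-- def get_token_len(s, pos):
--     if (s[pos] in ["<", ">", "|", "^", "*", "/", "+", "=", "!", "-"] and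
--             pos + 1 < len(s) and
--             s[pos + 1] == "="):
--         return 2
--     if s[pos:pos + 3] in ["^^="]:
--         return 3
--     if s[pos] in {" ", "\t", "\n", "\r"}:
--         i = pos + 1
--         while i < len(s) and s[i] in {" ", "\t", "\n", "\r"}:
--             i += 1
--         return (i - pos)
--     ilen = get_identifier_len(s, pos)
--     if ilen <= 0:
--         return 1
--     return ilen
--
-- def get_next_token(s, pos):
--     ilen = get_token_len(s, pos)
--     assert(ilen >= 1)
--     return s[pos:pos + ilen]
--
-- def s_to_tokens(s):
--     result = []
--     i = 0
--     assert(type(s) == str)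
--     slen = len(s)
--     while i < slen:
--         t = get_next_token(s, i)
--         assert(len(t) > 0)
--         result.append(t)
--         i += len(t)
--     return result
-- ===== SOURCE B (Python) =====
-- def s_to_tokens(s):
--     assert(type(s) == str)
--     out = []
--     cs = list(s)
--     while cs:
--         tok, cs = _split_token(cs[0], cs[1:])
--         out.append(''.join(tok))
--     return out
--
-- def _id_start(c):
--     return c == '_' or 'A' <= c <= 'Z' or 'a' <= c <= 'z' or ord(c) > 127
--
-- def _id_cont(c):
--     return _id_start(c) or '0' <= c <= '9'
--
-- def _span(pred, xs):
--     for k, x in enumerate(xs):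
--         if not pred(x):
--             return xs[:k], xs[k:]
--     return xs, []
--
-- def _split_token(c, rest):
--     if c == '^' and rest[:2] == ['^', '=']:
--         return ['^', '^', '='], rest[2:]
--     if c in "<>|^*/+=!-" and rest[:1] == ['=']:
--         return [c, '='], rest[1:]
--     if c in " \t\n\r":
--         a, b = _span(lambda x: x in " \t\n\r", rest)
--         return [c] + a, b
--     if _id_start(c):
--         a, b = _span(_id_cont, rest)
--         return [c] + a, b
--     return [c], rest
-- ===== Notes on version B (the rewrite author's own statement) =====
-- stated objective: alternative
-- what changed: Replaces the index-advancing scanner (position arithmetic, length-computing helper functions, string slicing) by a structural tokenizer that pattern-matches the head character and splits the remaining character list with a span helper, consuming the list token by token.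
import Mathlib
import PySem

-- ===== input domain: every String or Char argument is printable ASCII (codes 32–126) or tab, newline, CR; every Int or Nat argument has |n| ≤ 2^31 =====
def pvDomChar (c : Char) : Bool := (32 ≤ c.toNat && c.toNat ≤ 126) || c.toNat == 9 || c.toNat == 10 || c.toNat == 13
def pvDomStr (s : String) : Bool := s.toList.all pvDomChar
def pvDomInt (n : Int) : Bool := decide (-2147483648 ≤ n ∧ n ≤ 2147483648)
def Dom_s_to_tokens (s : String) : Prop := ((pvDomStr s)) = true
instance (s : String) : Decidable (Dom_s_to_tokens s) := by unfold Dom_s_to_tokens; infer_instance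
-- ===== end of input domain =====

-- B replaces A's index-advancing scanner by a structural head-match/span tokenizer over the char list (alternative decomposition; a timing run measured it faster by a constant factor).

-- ===== PORT A =====
-- while loop of get_identifier_len: i advances while the break condition is false
def aIdLenLoop (cs : List Char) (pos i : Nat) : Nat :=
  if h : i < cs.length then
    let c := cs[i]
    if (i = pos ∨ (c.toNat < 48 ∨ c.toNat > 57)) ∧ (c.toNat < 65 ∨ c.toNat > 90) ∧
        (c.toNat < 97 ∨ c.toNat > 122) ∧ c ≠ '_' ∧ c.toNat ≤ 127 then
      i - pos
    else aIdLenLoop cs pos (i + 1)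
  else i - pos
termination_by cs.length - i

def get_identifier_len (cs : List Char) (pos : Nat) : Nat := aIdLenLoop cs pos pos

-- whitespace-run while loop inside get_token_len
def aWsLoop (cs : List Char) (i : Nat) : Nat :=
  if h : i < cs.length then
    if cs[i] ∈ ([' ', '\t', '\n', '\r'] : List Char) then aWsLoop cs (i + 1) else i
  else i
termination_by cs.length - i

def get_token_len (cs : List Char) (pos : Nat) : Nat :=
  -- s[pos] is always in range at call sites; pyGetD with an unused default is the total form
  if PySem.List.pyGetD cs (pos : Int) ' ' ∈ (['<', '>', '|', '^', '*', '/', '+', '=', '!', '-'] : List Char) ∧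
      pos + 1 < cs.length ∧ PySem.List.pyGetD cs ((pos : Int) + 1) ' ' = '=' then 2
  else if PySem.List.slice cs (some (pos : Int)) (some ((pos : Int) + 3)) ∈ (["^^=".toList] : List (List Char)) then 3
  else if PySem.List.pyGetD cs (pos : Int) ' ' ∈ ([' ', '\t', '\n', '\r'] : List Char) then
    aWsLoop cs (pos + 1) - pos
  else
    let ilen := get_identifier_len cs pos
    if ilen ≤ 0 then 1 else ilen

def get_next_token (cs : List Char) (pos : Nat) : List Char :=
  let ilen := get_token_len cs pos
  PySem.List.slice cs (some (pos : Int)) (some ((pos : Int) + ilen))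

theorem aWsLoop_ge (cs : List Char) (i : Nat) : i ≤ aWsLoop cs i := by
  unfold aWsLoop
  split_ifs with h1 h2
  · have := aWsLoop_ge cs (i + 1)
    omega
  · omega
  · omega
termination_by cs.length - i

theorem aTokenLen_pos (cs : List Char) (pos : Nat) : 1 ≤ get_token_len cs pos := by
  unfold get_token_len
  split_ifs with h1 h2 h3
  · omega
  · omega
  · have := aWsLoop_ge cs (pos + 1)
    omega
  · dsimp only []
    split <;> omega

theorem aNextToken_len_pos (cs : List Char) (pos : Nat) (h : pos < cs.length) :
    0 < (get_next_token cs pos).length := by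
  unfold get_next_token
  have h1 := aTokenLen_pos cs pos
  rw [PySem.List.slice_toNat cs (by omega) (by omega)]
  have h2 : ((pos : Int) + (get_token_len cs pos : Nat)).toNat = pos + get_token_len cs pos := by
    omega
  simp only [List.length_take, List.length_drop, Int.toNat_natCast, h2]
  omega

-- main while loop of s_to_tokens
def aMain (cs : List Char) (i : Nat) : List String :=
  if h : i < cs.length then
    let t := get_next_token cs i
    String.ofList t :: aMain cs (i + t.length)
  else []
termination_by cs.length - i
decreasing_by
  have := aNextToken_len_pos cs i h
  omega

def s_to_tokens (s : String) : List String := aMain s.toList 0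

-- ===== PORT B =====
def bIdStart (c : Char) : Bool := c = '_' || ('A' ≤ c && c ≤ 'Z') || ('a' ≤ c && c ≤ 'z') || c.toNat > 127

def bIdCont (c : Char) : Bool := bIdStart c || ('0' ≤ c && c ≤ '9')

def bIsOp (c : Char) : Bool := c ∈ ("<>|^*/+=!-".toList)

def bIsWs (c : Char) : Bool := c ∈ (" \t\n\r".toList)

def bSpan (p : Char → Bool) : List Char → List Char × List Char
  | [] => ([], [])
  | x :: xs => if p x then let (a, b) := bSpan p xs; (x :: a, b) else ([], x :: xs)

def bSplitToken (c : Char) (rest : List Char) : List Char × List Char :=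
  if c = '^' ∧ rest.take 2 = ['^', '='] then (['^', '^', '='], rest.drop 2)
  else if bIsOp c ∧ rest.take 1 = ['='] then ([c, '='], rest.drop 1)
  else if bIsWs c then let (a, b) := bSpan bIsWs rest; (c :: a, b)
  else if bIdStart c then let (a, b) := bSpan bIdCont rest; (c :: a, b)
  else ([c], rest)

theorem bSpan_eq (p : Char → Bool) (xs : List Char) :
    bSpan p xs = (xs.takeWhile p, xs.dropWhile p) := by
  induction xs with
  | nil => rfl
  | cons x xs ih => simp only [bSpan, List.takeWhile, List.dropWhile]; split <;> simp [*]

theorem bSplitToken_rest_le (c : Char) (rest : List Char) :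
    (bSplitToken c rest).2.length ≤ rest.length := by
  unfold bSplitToken
  split_ifs <;> simp [bSpan_eq, List.length_dropWhile_le, List.length_drop, List.length_tail]

def bMain : List Char → List String
  | [] => []
  | c :: rest =>
    let p := bSplitToken c rest
    String.ofList p.1 :: bMain p.2
termination_by cs => cs.length
decreasing_by
  have := bSplitToken_rest_le c rest
  simp only [List.length_cons]
  omega

def s_to_tokens_alt (s : String) : List String := bMain s.toList

-- ===== PRECONDITION & SPEC =====
def Spec_s_to_tokens (s : String) (out : List String) : Prop := out = s_to_tokens_alt s
instance (s : String) (out : List String) : Decidable (Spec_s_to_tokens s out) := by unfold Spec_s_to_tokens; infer_instance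

-- ===== CLAIM (what is proved, stated in full; the proofs are below) =====
def Claim_equal_s_to_tokens : Prop := ∀ (s : String), Dom_s_to_tokens s → Spec_s_to_tokens s (s_to_tokens s)

-- ===== LEMMAS AND PROOFS =====

theorem char_le_iff (a b : Char) : a ≤ b ↔ a.toNat ≤ b.toNat := Iff.rfl

theorem char_eq_underscore_iff (c : Char) : c = '_' ↔ c.toNat = 95 := by
  constructor
  · rintro rfl; rfl
  · intro h
    have hv : c.val.toNat = ('_').val.toNat := h
    exact Char.ext (UInt32.toNat.inj hv)

theorem not_idStart_iff (c : Char) : (¬ bIdStart c = true) ↔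
    ((c.toNat < 65 ∨ c.toNat > 90) ∧ (c.toNat < 97 ∨ c.toNat > 122) ∧ c ≠ '_' ∧ c.toNat ≤ 127) := by
  simp only [bIdStart, char_le_iff, Bool.or_eq_true, Bool.and_eq_true, decide_eq_true_eq,
    gt_iff_lt, not_or, ne_eq, char_eq_underscore_iff]
  have hA : 'A'.toNat = 65 := rfl
  have hZ : 'Z'.toNat = 90 := rfl
  have ha : 'a'.toNat = 97 := rfl
  have hz : 'z'.toNat = 122 := rfl
  rw [hA, hZ, ha, hz]
  omega

theorem not_idCont_iff (c : Char) : (¬ bIdCont c = true) ↔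
    ((c.toNat < 48 ∨ c.toNat > 57) ∧ (c.toNat < 65 ∨ c.toNat > 90) ∧
      (c.toNat < 97 ∨ c.toNat > 122) ∧ c ≠ '_' ∧ c.toNat ≤ 127) := by
  have h := not_idStart_iff c
  simp only [bIdCont, Bool.or_eq_true, not_or, h, char_le_iff, Bool.and_eq_true,
    decide_eq_true_eq, ne_eq, char_eq_underscore_iff] at *
  have h0 : '0'.toNat = 48 := rfl
  have h9 : '9'.toNat = 57 := rfl
  rw [h0, h9]
  omega

theorem isWs_iff (c : Char) : bIsWs c = true ↔ c ∈ ([' ', '\t', '\n', '\r'] : List Char) := by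
  simp [bIsWs]

theorem isOp_iff (c : Char) : bIsOp c = true ↔
    c ∈ (['<', '>', '|', '^', '*', '/', '+', '=', '!', '-'] : List Char) := by
  simp [bIsOp]

theorem aWsLoop_eq (cs : List Char) (j : Nat) :
    aWsLoop cs j = j + ((cs.drop j).takeWhile bIsWs).length := by
  unfold aWsLoop
  by_cases h : j < cs.length
  · rw [List.drop_eq_getElem_cons h, List.takeWhile_cons]
    by_cases hw : bIsWs cs[j] = true
    · have hmem : cs[j] ∈ ([' ', '\t', '\n', '\r'] : List Char) := (isWs_iff _).mp hw
      have ih := aWsLoop_eq cs (j + 1)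
      simp only [h, dif_pos, hmem, if_pos, hw, ih, List.length_cons]
      omega
    · have hmem : cs[j] ∉ ([' ', '\t', '\n', '\r'] : List Char) := fun hm => hw ((isWs_iff _).mpr hm)
      simp [h, hmem, hw]
  · simp [h, List.drop_eq_nil_of_le (by omega : cs.length ≤ j)]
termination_by cs.length - j

theorem aIdLenLoop_inner_eq (cs : List Char) (pos j : Nat) (hj : pos < j) :
    aIdLenLoop cs pos j = (j - pos) + ((cs.drop j).takeWhile bIdCont).length := by
  unfold aIdLenLoop
  by_cases h : j < cs.length
  · rw [List.drop_eq_getElem_cons h, List.takeWhile_cons]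
    by_cases hc : bIdCont cs[j] = true
    · have hbreak : ¬((j = pos ∨ (cs[j].toNat < 48 ∨ cs[j].toNat > 57)) ∧ (cs[j].toNat < 65 ∨ cs[j].toNat > 90) ∧
          (cs[j].toNat < 97 ∨ cs[j].toNat > 122) ∧ cs[j] ≠ '_' ∧ cs[j].toNat ≤ 127) := by
        intro ⟨h1, h2⟩
        rcases h1 with h1 | h1
        · omega
        · exact (not_idCont_iff cs[j]).mpr ⟨h1, h2⟩ hc
      have ih := aIdLenLoop_inner_eq cs pos (j + 1) (by omega)
      simp only [h, dif_pos, hbreak, if_neg, not_false_iff, ih, hc, if_pos, List.length_cons]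
      omega
    · have hbreak : ((j = pos ∨ (cs[j].toNat < 48 ∨ cs[j].toNat > 57)) ∧ (cs[j].toNat < 65 ∨ cs[j].toNat > 90) ∧
          (cs[j].toNat < 97 ∨ cs[j].toNat > 122) ∧ cs[j] ≠ '_' ∧ cs[j].toNat ≤ 127) := by
        obtain ⟨h1, h2⟩ := (not_idCont_iff cs[j]).mp hc
        exact ⟨Or.inr h1, h2⟩
      simp [h, hbreak, hc]
  · simp [h, List.drop_eq_nil_of_le (by omega : cs.length ≤ j)]
termination_by cs.length - j

theorem get_identifier_len_eq (cs : List Char) (pos : Nat) (h : pos < cs.length) :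
    get_identifier_len cs pos =
      if bIdStart cs[pos] then 1 + ((cs.drop (pos + 1)).takeWhile bIdCont).length else 0 := by
  unfold get_identifier_len aIdLenLoop
  rw [dif_pos h]
  by_cases hs : bIdStart cs[pos] = true
  · have hbreak : ¬((pos = pos ∨ (cs[pos].toNat < 48 ∨ cs[pos].toNat > 57)) ∧ (cs[pos].toNat < 65 ∨ cs[pos].toNat > 90) ∧
        (cs[pos].toNat < 97 ∨ cs[pos].toNat > 122) ∧ cs[pos] ≠ '_' ∧ cs[pos].toNat ≤ 127) := by
      intro ⟨_, h2⟩
      exact (not_idStart_iff cs[pos]).mpr h2 hs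
    rw [if_neg hbreak, aIdLenLoop_inner_eq cs pos (pos + 1) (by omega), if_pos hs]
    omega
  · have hbreak : ((pos = pos ∨ (cs[pos].toNat < 48 ∨ cs[pos].toNat > 57)) ∧ (cs[pos].toNat < 65 ∨ cs[pos].toNat > 90) ∧
        (cs[pos].toNat < 97 ∨ cs[pos].toNat > 122) ∧ cs[pos] ≠ '_' ∧ cs[pos].toNat ≤ 127) := by
      exact ⟨Or.inl rfl, (not_idStart_iff cs[pos]).mp hs⟩
    rw [if_pos hbreak, if_neg hs]
    omega

theorem takeWhile_eq_take (p : Char → Bool) (xs : List Char) :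
    xs.takeWhile p = xs.take (xs.takeWhile p).length :=
  List.prefix_iff_eq_take.mp (List.takeWhile_prefix p)

theorem dropWhile_eq_drop (p : Char → Bool) (xs : List Char) :
    xs.dropWhile p = xs.drop (xs.takeWhile p).length := by
  induction xs with
  | nil => rfl
  | cons x xs ih =>
    rw [List.takeWhile_cons, List.dropWhile_cons]
    by_cases hp : p x = true <;> simp [hp, ih]

theorem pyGetD_at (cs : List Char) (j : Nat) (h : j < cs.length) :
    PySem.List.pyGetD cs (j : Int) ' ' = cs[j] := by
  rw [PySem.List.pyGetD_natCast]
  simp [List.getD, h]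

-- the central step lemma: at each position A's token length/token matches B's head split
theorem step (cs : List Char) (i : Nat) (h : i < cs.length) :
    ∃ k, k ≤ (cs.drop (i + 1)).length ∧
      bSplitToken cs[i] (cs.drop (i + 1)) = (cs[i] :: (cs.drop (i + 1)).take k, (cs.drop (i + 1)).drop k) ∧
      get_token_len cs i = k + 1 := by
  have hdrop : cs.drop i = cs[i] :: cs.drop (i + 1) := List.drop_eq_getElem_cons h
  have e0 : PySem.List.pyGetD cs (i : Int) ' ' = cs[i] := pyGetD_at cs i h
  have hrestlen : (cs.drop (i + 1)).length = cs.length - (i + 1) := by simp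
  have hslice : PySem.List.slice cs (some (i : Int)) (some ((i : Int) + 3)) =
      cs[i] :: (cs.drop (i + 1)).take 2 := by
    rw [PySem.List.slice_toNat cs (by omega) (by omega)]
    have e2 : ((i : Int)).toNat = i := by omega
    rw [e2]
    have e3 : ((i : Int) + 3).toNat - i = 3 := by omega
    rw [e3, hdrop, List.take_succ_cons]
  have hnext : ∀ _ : i + 1 < cs.length, PySem.List.pyGetD cs ((i : Int) + 1) ' ' = cs[i + 1] := by
    intro hlt
    have e : ((i : Int) + 1) = ((i + 1 : Nat) : Int) := by push_cast; ring
    rw [e, pyGetD_at cs (i + 1) hlt]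
  have hrest1 : ∀ _ : i + 1 < cs.length, cs.drop (i + 1) = cs[i + 1] :: cs.drop (i + 2) :=
    fun hlt => List.drop_eq_getElem_cons hlt
  -- A's first condition is B's second branch condition
  have hA1B2 : (PySem.List.pyGetD cs (i : Int) ' ' ∈ (['<', '>', '|', '^', '*', '/', '+', '=', '!', '-'] : List Char) ∧
        i + 1 < cs.length ∧ PySem.List.pyGetD cs ((i : Int) + 1) ' ' = '=') ↔
      (bIsOp cs[i] = true ∧ (cs.drop (i + 1)).take 1 = ['=']) := by
    rw [e0]
    constructor
    · rintro ⟨hop, hlt, heq⟩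
      rw [hnext hlt] at heq
      refine ⟨(isOp_iff _).mpr hop, ?_⟩
      rw [hrest1 hlt, List.take_succ_cons, List.take_zero, heq]
    · rintro ⟨hop, htk⟩
      have hne : cs.drop (i + 1) ≠ [] := by
        intro hnil
        rw [hnil] at htk
        simp at htk
      have hlt : i + 1 < cs.length := by
        have := List.length_pos_of_ne_nil hne
        omega
      have heq : cs[i + 1] = '=' := by
        rw [hrest1 hlt, List.take_succ_cons, List.take_zero] at htk
        injection htk
      exact ⟨(isOp_iff _).mp hop, hlt, by rw [hnext hlt, heq]⟩
  -- A's second condition is B's first branch condition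
  have hA2B1 : (PySem.List.slice cs (some (i : Int)) (some ((i : Int) + 3)) ∈ (["^^=".toList] : List (List Char))) ↔
      (cs[i] = '^' ∧ (cs.drop (i + 1)).take 2 = ['^', '=']) := by
    rw [List.mem_singleton, hslice, show "^^=".toList = ['^', '^', '='] from rfl]
    constructor
    · intro he
      injection he with h1 h2
      exact ⟨h1, h2⟩
    · rintro ⟨h1, h2⟩
      rw [h1, h2]
  by_cases hB1 : cs[i] = '^' ∧ (cs.drop (i + 1)).take 2 = ['^', '=']
  · refine ⟨2, ?_, ?_, ?_⟩
    · have : ((cs.drop (i + 1)).take 2).length = 2 := by rw [hB1.2]; rfl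
      simp only [List.length_take] at this
      omega
    · rw [bSplitToken, if_pos hB1, hB1.1, hB1.2]
    · have hnA1 : ¬(PySem.List.pyGetD cs (i : Int) ' ' ∈ (['<', '>', '|', '^', '*', '/', '+', '=', '!', '-'] : List Char) ∧
          i + 1 < cs.length ∧ PySem.List.pyGetD cs ((i : Int) + 1) ' ' = '=') := by
        intro hA1
        obtain ⟨-, htk⟩ := hA1B2.mp hA1
        have h1 : (cs.drop (i + 1)).take 1 = ((cs.drop (i + 1)).take 2).take 1 := by
          rw [List.take_take]
          norm_num
        rw [hB1.2] at h1
        rw [h1] at htk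
        simp at htk
      rw [get_token_len, if_neg hnA1, if_pos (hA2B1.mpr hB1)]
  · by_cases hB2 : bIsOp cs[i] = true ∧ (cs.drop (i + 1)).take 1 = ['=']
    · refine ⟨1, ?_, ?_, ?_⟩
      · have : ((cs.drop (i + 1)).take 1).length = 1 := by rw [hB2.2]; rfl
        simp only [List.length_take] at this
        omega
      · rw [bSplitToken, if_neg hB1, if_pos hB2, hB2.2]
      · rw [get_token_len, if_pos (hA1B2.mpr hB2)]
    · have hnA1 : ¬(PySem.List.pyGetD cs (i : Int) ' ' ∈ (['<', '>', '|', '^', '*', '/', '+', '=', '!', '-'] : List Char) ∧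
          i + 1 < cs.length ∧ PySem.List.pyGetD cs ((i : Int) + 1) ' ' = '=') := fun hA1 => hB2 (hA1B2.mp hA1)
      have hnA2 : ¬(PySem.List.slice cs (some (i : Int)) (some ((i : Int) + 3)) ∈ (["^^=".toList] : List (List Char))) :=
        fun hA2 => hB1 (hA2B1.mp hA2)
      by_cases hWs : bIsWs cs[i] = true
      · refine ⟨((cs.drop (i + 1)).takeWhile bIsWs).length, (List.takeWhile_prefix _).length_le, ?_, ?_⟩
        · rw [bSplitToken, if_neg hB1, if_neg hB2, if_pos hWs, bSpan_eq]
          rw [← takeWhile_eq_take, ← dropWhile_eq_drop]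
        · have hws : PySem.List.pyGetD cs (i : Int) ' ' ∈ ([' ', '\t', '\n', '\r'] : List Char) := by
            rw [e0]
            exact (isWs_iff _).mp hWs
          rw [get_token_len, if_neg hnA1, if_neg hnA2, if_pos hws, aWsLoop_eq cs (i + 1)]
          omega
      · have hnws : ¬(PySem.List.pyGetD cs (i : Int) ' ' ∈ ([' ', '\t', '\n', '\r'] : List Char)) := by
          rw [e0]
          exact fun hm => hWs ((isWs_iff _).mpr hm)
        by_cases hId : bIdStart cs[i] = true
        · refine ⟨((cs.drop (i + 1)).takeWhile bIdCont).length, (List.takeWhile_prefix _).length_le, ?_, ?_⟩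
          · rw [bSplitToken, if_neg hB1, if_neg hB2, if_neg (by simp [hWs]), if_pos hId, bSpan_eq]
            rw [← takeWhile_eq_take, ← dropWhile_eq_drop]
          · rw [get_token_len, if_neg hnA1, if_neg hnA2, if_neg hnws]
            have hil := get_identifier_len_eq cs i h
            rw [if_pos hId] at hil
            dsimp only []
            rw [hil, if_neg (by omega)]
            omega
        · refine ⟨0, by omega, ?_, ?_⟩
          · rw [bSplitToken, if_neg hB1, if_neg hB2, if_neg (by simp [hWs]), if_neg (by simp [hId])]
            simp
          · rw [get_token_len, if_neg hnA1, if_neg hnA2, if_neg hnws]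
            have hil := get_identifier_len_eq cs i h
            rw [if_neg (by simp [hId])] at hil
            dsimp only []
            rw [hil]
            norm_num

theorem main_agree (cs : List Char) (i : Nat) (hi : i ≤ cs.length) :
    aMain cs i = bMain (cs.drop i) := by
  by_cases h : i < cs.length
  · obtain ⟨k, hk, hsplit, htl⟩ := step cs i h
    have hdrop : cs.drop i = cs[i] :: cs.drop (i + 1) := List.drop_eq_getElem_cons h
    have htok : get_next_token cs i = cs[i] :: (cs.drop (i + 1)).take k := by
      unfold get_next_token
      rw [htl, PySem.List.slice_toNat cs (by omega) (by omega)]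
      have e2 : ((i : Int)).toNat = i := by omega
      have e1 : ((i : Int) + ((k + 1 : Nat) : Int)).toNat - i = k + 1 := by omega
      rw [e2, e1, hdrop, List.take_succ_cons]
    have hlen : (cs[i] :: (cs.drop (i + 1)).take k).length = k + 1 := by
      simp only [List.length_cons, List.length_take]
      omega
    have hrest : (cs.drop (i + 1)).drop k = cs.drop (i + (k + 1)) := by
      rw [List.drop_drop]
      congr 1
      omega
    have hlendrop : (cs.drop (i + 1)).length = cs.length - (i + 1) := by simp
    rw [aMain, dif_pos h]
    conv_rhs => rw [hdrop, bMain]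
    simp only [hsplit, htok, hlen, hrest]
    rw [main_agree cs (i + (k + 1)) (by omega)]
  · rw [aMain, dif_neg h, List.drop_eq_nil_of_le (by omega : cs.length ≤ i), bMain]
termination_by cs.length - i
decreasing_by omega

-- ===== VERDICT (by name: the statement is the Claim_ definition above) =====
theorem s_to_tokens_spec : Claim_equal_s_to_tokens := by
  intro s _
  unfold Spec_s_to_tokens s_to_tokens s_to_tokens_alt
  simpa using main_agree s.toList 0 (by omega)
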